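-- pv_equiv track=rewrite | github.com/eriklysoe/biotools | app/primercheck/utils_structure.py | _check_3prime_dimer
-- ===== SOURCE A (Python) =====
-- def _check_3prime_dimer(seq1, seq2, tail_len=5):
--     """
--     Heuristic check if the 3' end of seq1 can base-pair with seq2.
--     Returns True if >=3 of the last tail_len bases can pair.
--     """
--     complement = {"A": "T", "T": "A", "G": "C", "C": "G"}
--     tail = seq1[-tail_len:]
--     tail_rc = "".join(complement.get(c, "N") for c in reversed(tail))
--
--     # Check if tail_rc appears anywhere in seq2
--     for i in range(len(seq2) - len(tail_rc) + 1):
--         matches = sum(1 for a, b in zip(tail_rc, seq2[i:i+len(tail_rc)]) if a == b)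
--         if matches >= 3:
--             return True
--
--     return False
-- ===== SOURCE B (Python) =====
-- def _check_3prime_dimer(seq1, seq2, tail_len=5):
--     """
--     Heuristic check if the 3' end of seq1 can base-pair with seq2.
--     Returns True if >=3 of the last tail_len bases can pair.
--     Diagonal/offset-histogram formulation: one counts cell per alignment
--     offset, updated once per tail position instead of rescanning windows.
--     """
--     complement = {"A": "T", "T": "A", "G": "C", "C": "G"}
--     tail = seq1[-tail_len:]
--     tail_rc = "".join(complement.get(c, "N") for c in reversed(tail))
--
--     counts = [0] * (len(seq2) - len(tail_rc) + 1)
--     for j, cj in enumerate(tail_rc):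
--         counts = [c + (seq2[i + j] == cj) for i, c in enumerate(counts)]
--     return any(c >= 3 for c in counts)
-- ===== Notes on version B (the rewrite author's own statement) =====
-- stated objective: alternative
-- what changed: B replaces A's per-window rescan (for each alignment offset, re-count matches over the whole tail) by an offset-histogram: one counter per alignment offset, updated once per tail position j against the diagonal seq2[i+j], then a single any() over the counters.
import Mathlib
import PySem

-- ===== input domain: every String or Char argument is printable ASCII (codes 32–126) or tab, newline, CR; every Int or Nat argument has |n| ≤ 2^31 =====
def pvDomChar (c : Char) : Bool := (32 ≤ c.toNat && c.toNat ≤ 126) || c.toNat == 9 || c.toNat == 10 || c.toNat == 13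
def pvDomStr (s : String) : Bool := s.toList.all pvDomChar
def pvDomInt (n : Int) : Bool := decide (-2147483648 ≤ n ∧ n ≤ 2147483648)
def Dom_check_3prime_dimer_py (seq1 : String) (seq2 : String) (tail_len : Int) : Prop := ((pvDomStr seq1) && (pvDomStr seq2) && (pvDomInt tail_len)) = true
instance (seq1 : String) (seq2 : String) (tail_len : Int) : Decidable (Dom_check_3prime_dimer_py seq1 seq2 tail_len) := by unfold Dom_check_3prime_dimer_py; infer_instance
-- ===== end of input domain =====

-- B replaces A's per-window match recount by an offset-histogram updated once per tail position (objective: alternative, same cost).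

-- ===== PORT A =====
-- shared helper: both Pythons build tail_rc with the identical two lines
def pvTailRC (seq1 : String) (tail_len : Int) : List Char :=
  let comp : PySem.Dict Char Char :=
    ((((PySem.Dict.empty).insert 'A' 'T').insert 'T' 'A').insert 'G' 'C').insert 'C' 'G'
  (PySem.List.slice seq1.toList (some (-tail_len)) none).reverse.map (fun c => comp.getD c 'N')

def check_3prime_dimer_py (seq1 : String) (seq2 : String) (tail_len : Int) : Bool :=
  let tail_rc := pvTailRC seq1 tail_len
  let s2 := seq2.toList
  -- 'for i in range(…): if matches >= 3: return True' then 'return False' is .any over the range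
  (PySem.List.pyRange 0 ((s2.length : Int) - (tail_rc.length : Int) + 1) 1).any (fun i =>
    ((tail_rc.zip (PySem.List.slice s2 (some i) (some (i + (tail_rc.length : Int))))).foldl
      (fun acc p => if p.1 == p.2 then acc + 1 else acc) (0 : Int)) ≥ 3)

-- ===== PORT B =====
def check_3prime_dimer_py_alt (seq1 : String) (seq2 : String) (tail_len : Int) : Bool :=
  let tail_rc := pvTailRC seq1 tail_len
  let s2 := seq2.toList
  let counts0 : List Int := List.replicate ((s2.length : Int) - (tail_rc.length : Int) + 1).toNat 0
  -- seq2[i + j]: ported with pyGetD; the index is provably in range for every cell of counts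
  let counts := (PySem.List.enumerate tail_rc).foldl
    (fun counts p =>
      (PySem.List.enumerate counts).map (fun q =>
        q.2 + (if PySem.List.pyGetD s2 (q.1 + p.1) ' ' == p.2 then (1 : Int) else 0)))
    counts0
  counts.any (fun c => c ≥ 3)

-- ===== PRECONDITION & SPEC =====
def Spec_check_3prime_dimer_py (seq1 : String) (seq2 : String) (tail_len : Int) (out : Bool) : Prop := out = check_3prime_dimer_py_alt seq1 seq2 tail_len
instance (seq1 : String) (seq2 : String) (tail_len : Int) (out : Bool) : Decidable (Spec_check_3prime_dimer_py seq1 seq2 tail_len out) := by unfold Spec_check_3prime_dimer_py; infer_instance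

-- ===== CLAIM (what is proved, stated in full; the proofs are below) =====
def Claim_equal_check_3prime_dimer_py : Prop := ∀ (seq1 : String) (seq2 : String) (tail_len : Int), Dom_check_3prime_dimer_py seq1 seq2 tail_len → Spec_check_3prime_dimer_py seq1 seq2 tail_len (check_3prime_dimer_py seq1 seq2 tail_len)

-- ===== LEMMAS AND PROOFS =====

-- B's per-tail-position update of the counts list
def pvStep (s2 : List Char) (counts : List Int) (p : Int × Char) : List Int :=
  (PySem.List.enumerate counts).map (fun q =>
    q.2 + (if PySem.List.pyGetD s2 (q.1 + p.1) ' ' == p.2 then (1 : Int) else 0))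

-- total contribution of tail positions (enumerated from j0) to the counter at offset i
def pvAdd (s2 rc : List Char) (j0 i : Int) : Int :=
  ((PySem.List.enumerate rc j0).map (fun p =>
    if PySem.List.pyGetD s2 (i + p.1) ' ' == p.2 then (1 : Int) else 0)).sum

-- the match count of the window at offset k, common form both sides reduce to
def pvWin (s2 rc : List Char) (k : Nat) : Int :=
  ((rc.zip (s2.drop k)).countP (fun p => p.1 == p.2) : Int)

lemma pvStep_length (s2 : List Char) (counts : List Int) (p : Int × Char) :
    (pvStep s2 counts p).length = counts.length := by
  simp [pvStep, PySem.List.length_enumerate]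

lemma pvFold_length (s2 rc : List Char) (j0 : Int) (counts : List Int) :
    ((PySem.List.enumerate rc j0).foldl (pvStep s2) counts).length = counts.length := by
  induction rc generalizing j0 counts with
  | nil => simp [PySem.List.enumerate_nil]
  | cons c rc ih => simp [PySem.List.enumerate_cons, ih, pvStep_length]

lemma pvFold_getElem? (s2 rc : List Char) (j0 : Int) (counts : List Int) (i : Nat) :
    ((PySem.List.enumerate rc j0).foldl (pvStep s2) counts)[i]? =
      counts[i]?.map (· + pvAdd s2 rc j0 i) := by
  induction rc generalizing j0 counts with
  | nil =>
      simp [PySem.List.enumerate_nil, pvAdd]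
  | cons c rc ih =>
      rw [PySem.List.enumerate_cons, List.foldl_cons, ih]
      have hstep : (pvStep s2 counts (j0, c))[i]? =
          counts[i]?.map (· + (if PySem.List.pyGetD s2 ((i : Int) + j0) ' ' == c then (1 : Int) else 0)) := by
        simp [pvStep, List.getElem?_map, PySem.List.getElem?_enumerate]
        cases counts[i]? <;> simp
      rw [hstep]
      cases h : counts[i]? with
      | none => simp
      | some v =>
          simp [pvAdd, PySem.List.enumerate_cons]
          ring
      
lemma pvAdd_eq_win (s2 rc : List Char) (j0 k : Nat)
    (h : k + j0 + rc.length ≤ s2.length) :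
    pvAdd s2 rc (j0 : Int) (k : Int) = pvWin s2 rc (k + j0) := by
  induction rc generalizing j0 with
  | nil => simp [pvAdd, pvWin, PySem.List.enumerate_nil]
  | cons c rc ih =>
      have hk : k + j0 < s2.length := by simp at h; omega
      have hdrop : s2.drop (k + j0) = s2[k + j0] :: s2.drop (k + j0 + 1) :=
        (List.getElem_cons_drop hk).symm
      have hget : PySem.List.pyGetD s2 ((k : Int) + (j0 : Int)) ' ' = s2[k + j0] := by
        have : ((k : Int) + (j0 : Int)) = ((k + j0 : Nat) : Int) := by push_cast; ring
        rw [this, PySem.List.pyGetD_natCast, List.getD_eq_getElem?_getD,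
          List.getElem?_eq_getElem hk]
        rfl
      have ih' := ih (j0 + 1) (by simp at h ⊢; omega)
      have hcast : ((j0 + 1 : Nat) : Int) = (j0 : Int) + 1 := by push_cast; ring
      rw [hcast] at ih'
      simp only [pvAdd, PySem.List.enumerate_cons, List.map_cons, List.sum_cons] at *
      rw [show k + (j0 + 1) = k + j0 + 1 from by omega] at ih'
      rw [ih']
      simp only [pvWin, hdrop, List.zip_cons_cons, List.countP_cons]
      push_cast
      rcases Decidable.em ((s2[k+j0] == c) = true) with hc | hc
      · simp [hget, BEq.comm] at hc ⊢
        simp [hc]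
        ring
      · simp [hget, BEq.comm] at hc ⊢
        simp [hc]

lemma pvZipTake {α β : Type} (rc : List α) (t : List β) :
    rc.zip (t.take rc.length) = rc.zip t := by
  induction rc generalizing t with
  | nil => simp
  | cons c rc ih =>
      cases t with
      | nil => simp
      | cons b t => simp [List.zip_cons_cons, ih]

-- ===== VERDICT (by name: the statement is the Claim_ definition above) =====
theorem check_3prime_dimer_py_spec : Claim_equal_check_3prime_dimer_py := by
  intro seq1 seq2 tail_len _
  simp only [Spec_check_3prime_dimer_py, check_3prime_dimer_py, check_3prime_dimer_py_alt]
  set rc := pvTailRC seq1 tail_len with hrc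
  set s2 := seq2.toList with hs2
  set L := rc.length with hL
  set n := s2.length with hn
  set W : Int := (n : Int) - (L : Int) + 1 with hW
  -- B's counts list
  set counts0 : List Int := List.replicate W.toNat 0 with hc0
  have hfold :
      (PySem.List.enumerate rc).foldl
        (fun counts p =>
          (PySem.List.enumerate counts).map (fun q =>
            q.2 + (if PySem.List.pyGetD s2 (q.1 + p.1) ' ' == p.2 then (1 : Int) else 0)))
        counts0
      = (PySem.List.enumerate rc).foldl (pvStep s2) counts0 := rfl
  rw [hfold]
  set counts := (PySem.List.enumerate rc).foldl (pvStep s2) counts0 with hc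
  have hclen : counts.length = W.toNat := by
    rw [hc, pvFold_length, hc0, List.length_replicate]
  have hcget : ∀ i : Nat, i < W.toNat → counts[i]? = some (pvWin s2 rc i) := by
    intro i hi
    have hbound : i + 0 + rc.length ≤ s2.length := by
      simp only [hW] at hi; omega
    rw [hc, pvFold_getElem? s2 rc 0 counts0 i, hc0, List.getElem?_replicate]
    simp only [hi, if_pos]
    have := pvAdd_eq_win s2 rc 0 i hbound
    simp only [Nat.cast_zero, Nat.add_zero] at this
    simp [this]
  apply Bool.eq_iff_iff.mpr
  constructor
  · -- A = true → B = true
    intro hA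
    rw [List.any_eq_true] at hA
    obtain ⟨i, hmem, hp⟩ := hA
    rw [PySem.List.mem_pyRange_one] at hmem
    obtain ⟨h0, hlt⟩ := hmem
    set k := i.toNat with hk
    have hik : i = (k : Int) := by omega
    have hkW : k < W.toNat := by omega
    have hkn : k + L ≤ n := by simp only [hW] at hkW; omega
    rw [List.any_eq_true]
    refine ⟨counts[k]'(by omega), List.getElem_mem _, ?_⟩
    have hck : counts[k]? = some (pvWin s2 rc k) := hcget k hkW
    have hval : counts[k]'(by omega) = pvWin s2 rc k := by
      have := List.getElem?_eq_getElem (l := counts) (i := k) (by omega)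
      rw [this] at hck; exact Option.some.inj hck
    rw [hval]
    -- now show 3 ≤ pvWin from hp
    rw [hik] at hp
    have hslice : PySem.List.slice s2 (some (k : Int)) (some ((k : Int) + (L : Int))) =
        (s2.drop k).take L := PySem.List.slice_natCast_add s2 k L
    rw [hslice] at hp
    rw [pvZipTake] at hp
    rw [PySem.List.foldl_if_add_one (p := fun q : Char × Char => q.1 == q.2)] at hp
    simpa [pvWin] using hp
  · -- B = true → A = true
    intro hB
    rw [List.any_eq_true] at hB
    obtain ⟨c, hmem, hp⟩ := hB
    obtain ⟨k, hk, hck⟩ := List.mem_iff_getElem.mp hmem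
    have hkW : k < W.toNat := hclen ▸ hk
    have hkn : k + L ≤ n := by simp only [hW] at hkW; omega
    have hval : c = pvWin s2 rc k := by
      have h1 := hcget k hkW
      rw [List.getElem?_eq_getElem (l := counts) (i := k) hk, hck] at h1
      exact Option.some.inj h1
    rw [List.any_eq_true]
    refine ⟨(k : Int), ?_, ?_⟩
    · rw [PySem.List.mem_pyRange_one]
      constructor
      · omega
      · simp only [hW] at hkW ⊢; omega
    · rw [PySem.List.slice_natCast_add s2 k L, pvZipTake,
        PySem.List.foldl_if_add_one (p := fun q : Char × Char => q.1 == q.2)]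
      rw [hval] at hp
      simpa [pvWin] using hp
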